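-- pv_equiv track=rewrite | github.com/Dejniel/Printer-EMX-040256-drivers | print_emx_040256.py | rle_encode_line
-- ===== SOURCE A (Python) =====
-- from typing import List, Tuple
--
-- def encode_run(color: int, count: int) -> List[int]:
--     out = []
--     while count > 127:
--         out.append((color << 7) | 127)
--         count -= 127
--     if count > 0:
--         out.append((color << 7) | count)
--     return out
--
-- def rle_encode_line(line: List[int]) -> List[int]:
--     if not line:
--         return []
--     runs: List[int] = []
--     prev = line[0]
--     count = 1
--     has_black = 1 if prev else 0
--     for pix in line[1:]:
--         if pix:
--             has_black = 1
--         if pix == prev: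
--             count += 1
--         else:
--             runs.extend(encode_run(prev, count))
--             prev = pix
--             count = 1
--     if has_black:
--         runs.extend(encode_run(prev, count))
--     if not runs:
--         runs.extend(encode_run(prev, count))
--     return runs
-- ===== SOURCE B (Python) =====
-- from typing import List
--
-- def rle_encode_line(line: List[int]) -> List[int]:
--     n = len(line)
--     starts = [i for i in range(n) if i == 0 or line[i] != line[i - 1]]
--     out: List[int] = []
--     for s, e in zip(starts, starts[1:] + [n]):
--         color = line[s]
--         count = e - s
--         q = (count - 1) // 127
--         out.extend([(color << 7) | 127] * q)
--         out.append((color << 7) | (count - 127 * q))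
--     return out
-- ===== Notes on version B (the rewrite author's own statement) =====
-- stated objective: alternative
-- what changed: B replaces A's single-pass accumulator (prev/count/has_black state with a subtract-127 while loop and an empty-runs repair) by a staged index-based algorithm: it first materializes the list of run-start indices by comparing line[i] with line[i-1] over range(n), then for each (start,end) boundary pair emits the run in closed form with one integer division q=(count-1)//127 and list replication instead of a loop.
import Mathlib
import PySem

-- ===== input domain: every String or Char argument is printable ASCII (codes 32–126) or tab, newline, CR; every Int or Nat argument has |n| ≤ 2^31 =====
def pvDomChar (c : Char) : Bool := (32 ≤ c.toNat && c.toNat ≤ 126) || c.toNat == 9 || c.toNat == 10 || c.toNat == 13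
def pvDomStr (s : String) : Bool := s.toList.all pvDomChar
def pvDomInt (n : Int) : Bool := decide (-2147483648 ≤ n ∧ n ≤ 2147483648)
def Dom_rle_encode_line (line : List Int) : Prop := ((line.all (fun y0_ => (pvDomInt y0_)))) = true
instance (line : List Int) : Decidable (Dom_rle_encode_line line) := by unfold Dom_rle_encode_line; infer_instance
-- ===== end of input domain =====

-- B replaces A's single-pass prev/count/has_black accumulator (with its subtract-127 while
-- loop and empty-runs repair, both provably redundant) by a staged index-based algorithm:
-- materialize the run-start indices, then emit each (start,end) run in closed form with one
-- integer division. Objective: alternative (same O(n) cost, different algorithm).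

-- ===== PORT A =====
-- encode_run: the while-loop becomes recursion on the same state (out accumulated in order)
def encode_run (color : Int) (count : Int) : List Int :=
  if count > 127 then
    (PySem.Int.bor (color <<< (7 : Nat)) 127) :: encode_run color (count - 127)
  else if count > 0 then [PySem.Int.bor (color <<< (7 : Nat)) count]
  else []
termination_by count.toNat
decreasing_by omega

-- the for-loop of A, state (runs, prev, count, has_black)
def aLoop : List Int → List Int → Int → Int → Int → (List Int × Int × Int × Int)
  | [], runs, prev, count, hb => (runs, prev, count, hb)
  | pix :: rest, runs, prev, count, hb =>
    let hb' := if pix ≠ 0 then 1 else hb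
    if pix = prev then aLoop rest runs prev (count + 1) hb'
    else aLoop rest (runs ++ encode_run prev count) pix 1 hb'

def rle_encode_line (line : List Int) : List Int :=
  match line with
  | [] => []
  | x :: xs =>
    let s := aLoop xs [] x 1 (if x ≠ 0 then 1 else 0)
    let runs := s.1
    let prev := s.2.1
    let count := s.2.2.1
    let hb := s.2.2.2
    let runs := if hb ≠ 0 then runs ++ encode_run prev count else runs
    let runs := if runs = [] then runs ++ encode_run prev count else runs
    runs

-- ===== PORT B =====
-- starts = [i for i in range(n) if i == 0 or line[i] != line[i-1]]
-- (indices are always in range: i ∈ range(n), and line[i-1] is only reached when i ≠ 0,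
--  so pyGetD with default 0 is exact here)
def bStarts (line : List Int) : List Int :=
  (PySem.List.pyRange 0 (line.length : Int) 1).filter
    (fun i => (i == 0) || !(PySem.List.pyGetD line i 0 == PySem.List.pyGetD line (i - 1) 0))

-- the loop body for one (s, e) pair: closed-form emission of a run
-- q = (count-1)//127 ; out.extend([(color<<7)|127]*q) ; out.append((color<<7)|(count-127*q))
def bEmit (color : Int) (count : Int) : List Int :=
  let q := PySem.Int.floordiv (count - 1) 127
  List.replicate q.toNat (PySem.Int.bor (color <<< (7 : Nat)) 127)
    ++ [PySem.Int.bor (color <<< (7 : Nat)) (count - 127 * q)]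

def rle_encode_line_alt (line : List Int) : List Int :=
  let n : Int := line.length
  let starts := bStarts line
  (starts.zip (PySem.List.slice starts (some 1) none ++ [n])).flatMap
    (fun p => bEmit (PySem.List.pyGetD line p.1 0) (p.2 - p.1))

-- ===== PRECONDITION & SPEC =====
def Spec_rle_encode_line (line : List Int) (out : List Int) : Prop := out = rle_encode_line_alt line
instance (line : List Int) (out : List Int) : Decidable (Spec_rle_encode_line line out) := by unfold Spec_rle_encode_line; infer_instance

-- ===== CLAIM (what is proved, stated in full; the proofs are below) =====
def Claim_equal_rle_encode_line : Prop := ∀ (line : List Int), Dom_rle_encode_line line → Spec_rle_encode_line line (rle_encode_line line)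

-- ===== LEMMAS AND PROOFS =====

-- Reference semantics both ports are reduced to: the list of (colour, run-length) groups,
-- each flattened by the canonical 127-capped emitter emitRun.

def takeRun (c : Int) : List Int → Nat × List Int
  | [] => (0, [])
  | x :: xs =>
    if x = c then
      let p := takeRun c xs
      (p.1 + 1, p.2)
    else (0, x :: xs)

theorem takeRun_len_le (c : Int) : ∀ xs : List Int, (takeRun c xs).2.length ≤ xs.length := by
  intro xs
  induction xs with
  | nil => simp [takeRun]
  | cons x xs ih =>
    simp only [takeRun]
    split
    · exact Nat.le_succ_of_le ih
    · simp

def groups : List Int → List (Int × Int)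
  | [] => []
  | x :: xs =>
    let p := takeRun x xs
    (x, (p.1 : Int) + 1) :: groups p.2
termination_by xs => xs.length
decreasing_by exact Nat.lt_succ_of_le (takeRun_len_le _ _)

def emitRun (color : Int) (count : Int) : List Int :=
  if count > 127 then
    (PySem.Int.bor (color <<< (7 : Nat)) 127) :: emitRun color (count - 127)
  else [PySem.Int.bor (color <<< (7 : Nat)) count]
termination_by count.toNat
decreasing_by omega

def flatRuns (line : List Int) : List Int :=
  (groups line).flatMap (fun g => emitRun g.1 g.2)

-- ---------- A-side: rle_encode_line = flatRuns ----------

theorem encode_run_eq_emitRun (color : Int) (count : Int) (h : 1 ≤ count) :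
    encode_run color count = emitRun color count := by
  by_cases h127 : count > 127
  · rw [encode_run, emitRun, if_pos h127, if_pos h127,
      encode_run_eq_emitRun color (count - 127) (by omega)]
  · rw [encode_run, emitRun, if_neg h127, if_neg h127, if_pos (by omega)]
termination_by count.toNat
decreasing_by omega

theorem emitRun_ne_nil (color count : Int) : emitRun color count ≠ [] := by
  rw [emitRun]
  split <;> simp

def contGroups (prev count : Int) (xs : List Int) : List (Int × Int) :=
  let p := takeRun prev xs
  (prev, count + (p.1 : Int)) :: groups p.2

theorem groups_cons (x : Int) (xs : List Int) : groups (x :: xs) = contGroups x 1 xs := by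
  rw [groups, contGroups]
  simp [add_comm]

theorem aLoop_spec : ∀ (xs runs : List Int) (prev count hb : Int), 1 ≤ count →
    (aLoop xs runs prev count hb).1 ++
      emitRun (aLoop xs runs prev count hb).2.1 (aLoop xs runs prev count hb).2.2.1
    = runs ++ (contGroups prev count xs).flatMap (fun g => emitRun g.1 g.2) := by
  intro xs
  induction xs with
  | nil =>
    intro runs prev count hb _
    simp [aLoop, contGroups, takeRun, groups]
  | cons pix rest ih =>
    intro runs prev count hb hc
    by_cases hpp : pix = prev
    · rw [aLoop, if_pos hpp, ih runs prev (count + 1) _ (by omega)]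
      subst hpp
      have harith : count + 1 + ((takeRun pix rest).1 : Int)
          = count + (((takeRun pix rest).1 + 1 : Nat) : Int) := by push_cast; ring
      simp [contGroups, takeRun, harith]
    · rw [aLoop, if_neg hpp, ih _ pix 1 _ (by omega)]
      simp only [contGroups, takeRun]
      rw [if_neg hpp, encode_run_eq_emitRun prev count hc, groups_cons]
      simp [contGroups, List.append_assoc]

theorem aLoop_count_ge : ∀ (xs runs : List Int) (prev count hb : Int), 1 ≤ count →
    1 ≤ (aLoop xs runs prev count hb).2.2.1 := by
  intro xs
  induction xs with
  | nil => intro _ _ _ _ h; exact h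
  | cons pix rest ih =>
    intro runs prev count hb hc
    rw [aLoop]
    split
    · exact ih _ _ _ _ (by omega)
    · exact ih _ _ _ _ (by omega)

theorem aLoop_hb : ∀ (xs runs : List Int) (prev count hb : Int),
    (aLoop xs runs prev count hb).2.2.2 = if ∃ p ∈ xs, p ≠ 0 then 1 else hb := by
  intro xs
  induction xs with
  | nil => intro _ _ _ _; simp [aLoop]
  | cons pix rest ih =>
    intro runs prev count hb
    rw [aLoop]
    by_cases hpz : pix = 0
    · subst hpz
      simp only [ne_eq, not_true_eq_false, if_false]
      split <;> · rw [ih]; simp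
    · simp only [ne_eq, hpz, not_false_eq_true, if_true]
      split <;> · rw [ih]; simp [hpz]

theorem aLoop_all_zero : ∀ (xs runs : List Int) (count hb : Int),
    (∀ p ∈ xs, p = 0) →
    aLoop xs runs 0 count hb = (runs, 0, count + (xs.length : Int), hb) := by
  intro xs
  induction xs with
  | nil => intro _ _ _ _; simp [aLoop]
  | cons pix rest ih =>
    intro runs count hb hall
    have hp : pix = 0 := hall pix (by simp)
    subst hp
    rw [aLoop]
    simp only [ne_eq, not_true_eq_false, if_false, if_true]
    rw [ih _ _ _ (fun p hp => hall p (by simp [hp]))]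
    simp only [List.length_cons]
    push_cast
    rw [show count + 1 + (rest.length : Int) = count + ((rest.length : Int) + 1) by ring]

theorem takeRun_all_zero : ∀ xs : List Int, (∀ p ∈ xs, p = 0) →
    takeRun 0 xs = (xs.length, []) := by
  intro xs
  induction xs with
  | nil => intro _; simp [takeRun]
  | cons x rest ih =>
    intro hall
    have hx : x = 0 := hall x (by simp)
    subst hx
    rw [takeRun, if_pos rfl, ih (fun p hp => hall p (by simp [hp]))]
    simp

theorem A_eq_flat (line : List Int) : rle_encode_line line = flatRuns line := by
  match line with
  | [] => simp [rle_encode_line, flatRuns, groups]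
  | x :: xs =>
    simp only [rle_encode_line]
    set hb0 : Int := if x ≠ 0 then 1 else 0 with hhb0
    set s := aLoop xs [] x 1 hb0 with hs
    have hc : 1 ≤ s.2.2.1 := aLoop_count_ge xs [] x 1 hb0 (le_refl 1)
    have hmain : s.1 ++ emitRun s.2.1 s.2.2.1 = flatRuns (x :: xs) := by
      rw [flatRuns, groups_cons]
      exact aLoop_spec xs [] x 1 hb0 (le_refl 1)
    by_cases hbz : s.2.2.2 ≠ 0
    · rw [if_pos hbz, encode_run_eq_emitRun s.2.1 s.2.2.1 hc]
      rw [if_neg (by simp [emitRun_ne_nil])]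
      exact hmain
    · push_neg at hbz
      have hhb := aLoop_hb xs [] x 1 hb0
      rw [← hs] at hhb
      have hx0 : x = 0 ∧ ∀ p ∈ xs, p = 0 := by
        by_cases hex : ∃ p ∈ xs, p ≠ 0
        · rw [if_pos hex] at hhb; omega
        · rw [if_neg hex] at hhb
          push_neg at hex
          constructor
          · by_contra hxne
            rw [hhb0] at hhb
            simp [hxne] at hhb
            omega
          · exact hex
      obtain ⟨hx, hall⟩ := hx0
      subst hx
      have hsv : s = ([], 0, 1 + (xs.length : Int), hb0) := by
        rw [hs]; exact aLoop_all_zero xs [] 1 hb0 hall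
      have hb00 : hb0 = 0 := by rw [hsv] at hbz; exact hbz
      rw [hsv, hb00]
      norm_num
      rw [encode_run_eq_emitRun 0 (1 + (xs.length : Int)) (by omega)]
      rw [flatRuns, groups, takeRun_all_zero xs hall]
      simp [add_comm, groups]

-- ---------- B-side: rle_encode_line_alt = flatRuns ----------

theorem bEmit_eq_emitRun (color : Int) (count : Int) (h : 1 ≤ count) :
    bEmit color count = emitRun color count := by
  by_cases h127 : count > 127
  · rw [emitRun, if_pos h127, ← bEmit_eq_emitRun color (count - 127) (by omega)]
    simp only [bEmit]
    rw [PySem.Int.floordiv_eq_ediv_of_pos (by omega), PySem.Int.floordiv_eq_ediv_of_pos (by omega)]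
    have hq : (count - 1) / 127 = (count - 127 - 1) / 127 + 1 := by omega
    have hq0 : 0 ≤ (count - 127 - 1) / 127 := Int.ediv_nonneg (by omega) (by omega)
    rw [hq]
    have htn : ((count - 127 - 1) / 127 + 1).toNat = ((count - 127 - 1) / 127).toNat + 1 := by omega
    rw [htn, List.replicate_succ, List.cons_append]
    have hval : count - 127 * ((count - 127 - 1) / 127 + 1)
        = count - 127 - 127 * ((count - 127 - 1) / 127) := by ring
    rw [hval]
  · rw [emitRun, if_neg h127]
    simp only [bEmit]
    rw [PySem.Int.floordiv_eq_ediv_of_pos (by omega)]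
    have hq : (count - 1) / 127 = 0 := by omega
    rw [hq]
    norm_num
termination_by count.toNat
decreasing_by omega

-- run-start indices, recursively: prev = previous pixel, i = current absolute index
def specStarts (prev : Int) : List Int → Int → List Int
  | [], _ => []
  | y :: ys, i =>
    if y = prev then specStarts y ys (i + 1) else i :: specStarts y ys (i + 1)

theorem takeRun_len (c : Int) : ∀ xs : List Int,
    (takeRun c xs).1 + (takeRun c xs).2.length = xs.length := by
  intro xs
  induction xs with
  | nil => simp [takeRun]
  | cons x rest ih =>
    rw [takeRun]
    split
    · simp only [List.length_cons]
      omega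
    · simp

theorem takeRun_drop (c : Int) : ∀ xs : List Int,
    xs.drop (takeRun c xs).1 = (takeRun c xs).2 := by
  intro xs
  induction xs with
  | nil => simp [takeRun]
  | cons x rest ih =>
    rw [takeRun]
    split
    · simpa using ih
    · simp

theorem specStarts_eq (x : Int) : ∀ (xs : List Int) (i : Int),
    specStarts x xs i =
      match (takeRun x xs).2 with
      | [] => []
      | r :: rs =>
        (i + ((takeRun x xs).1 : Int)) :: specStarts r rs (i + ((takeRun x xs).1 : Int) + 1) := by
  intro xs
  induction xs generalizing x with
  | nil => intro i; simp [specStarts, takeRun]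
  | cons y ys ih =>
    intro i
    rw [specStarts, takeRun]
    by_cases hy : y = x
    · subst hy
      rw [if_pos rfl, ih y (i + 1)]
      cases hrr : (takeRun y ys).2 with
      | nil => simp [hrr]
      | cons r rs =>
        have h1 : i + 1 + ((takeRun y ys).1 : Int)
            = i + (((takeRun y ys).1 + 1 : Nat) : Int) := by push_cast; ring
        simp [hrr, h1]
    · simp [hy]

-- the filter over range(j, n) computes specStarts from position j on (1 ≤ j)
theorem filt (L : List Int) : ∀ (d j : Nat), 1 ≤ j → j + d = L.length →
    (PySem.List.pyRange (j : Int) (L.length : Int) 1).filter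
      (fun i => (i == 0) || !(PySem.List.pyGetD L i 0 == PySem.List.pyGetD L (i - 1) 0))
    = specStarts (L.getD (j - 1) 0) (L.drop j) (j : Int) := by
  intro d
  induction d with
  | zero =>
    intro j h1 h2
    rw [PySem.List.pyRange_one_eq_nil (by omega), List.drop_of_length_le (by omega)]
    simp [specStarts]
  | succ d ih =>
    intro j h1 h2
    have hj : j < L.length := by omega
    rw [PySem.List.pyRange_one_cons (by exact_mod_cast hj), List.filter_cons]
    have hcast : ((j : Int)) - 1 = ((j - 1 : Nat) : Int) := by omega
    have hpred : ((((j : Int)) == 0) ||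
        !(PySem.List.pyGetD L (j : Int) 0 == PySem.List.pyGetD L ((j : Int) - 1) 0))
        = !(L.getD j 0 == L.getD (j - 1) 0) := by
      rw [hcast]
      simp only [PySem.List.pyGetD_natCast]
      have hz : ((j : Int) == 0) = false := by simp; omega
      rw [hz, Bool.false_or]
    rw [hpred]
    have hdrop : L.drop j = L[j] :: L.drop (j + 1) := List.drop_eq_getElem_cons hj
    have hcons : ((j : Int)) + 1 = (((j + 1 : Nat)) : Int) := by push_cast; ring
    rw [hdrop, specStarts, hcons, ih (j + 1) (by omega) (by omega)]
    have hgj : L.getD j 0 = L[j] := List.getD_eq_getElem L 0 hj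
    have hgj' : L.getD (j + 1 - 1) 0 = L[j] := by simpa using hgj
    rw [hgj, hgj']
    by_cases he : L[j] = L.getD (j - 1) 0
    · rw [if_pos he, he]
      simp
    · have he' : ¬L[j] = L[j - 1]?.getD 0 := by
        simpa [List.getD_eq_getElem?_getD] using he
      rw [if_neg he]
      simp [he']

theorem bStarts_cons (x : Int) (xs : List Int) :
    bStarts (x :: xs) = 0 :: specStarts x xs 1 := by
  rw [bStarts]
  have hlen : (0 : Int) < ((x :: xs).length : Int) := by simp
  rw [PySem.List.pyRange_one_cons hlen, List.filter_cons]
  have h00 : (((0 : Int)) == 0) = true := by simp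
  rw [h00, Bool.true_or, if_pos rfl]
  have h1 : ((0 : Int)) + 1 = ((1 : Nat) : Int) := by norm_num
  rw [h1, filt (x :: xs) xs.length 1 (le_refl 1) (by rw [List.length_cons]; omega)]
  simp

-- zip-core over starts = i :: specStarts x xs (i+1) flattens to flatRuns (x :: xs)
theorem zip_core (N : Nat) : ∀ (xs : List Int), xs.length ≤ N →
    ∀ (x : Int) (i : Nat) (L : List Int), L.drop i = x :: xs →
    (((i : Int) :: specStarts x xs ((i : Int) + 1)).zip
        ((specStarts x xs ((i : Int) + 1)) ++ [(L.length : Int)])).flatMap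
      (fun p => bEmit (PySem.List.pyGetD L p.1 0) (p.2 - p.1))
    = flatRuns (x :: xs) := by
  induction N with
  | zero =>
    intro xs hxs x i L hdrop
    have hnil : xs = [] := List.length_eq_zero_iff.mp (by omega)
    subst hnil
    have hi : i ≤ L.length := by
      by_contra hgt
      rw [List.drop_of_length_le (by omega)] at hdrop
      exact List.cons_ne_nil x [] hdrop.symm
    have hlen : L.length = i + 1 := by
      have hld := congrArg List.length hdrop
      simp only [List.length_drop, List.length_cons, List.length_nil] at hld
      omega
    have hget : L.getD i 0 = x := by
      have h9 : L[i]? = some x := by rw [← List.head?_drop, hdrop]; rfl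
      simp [List.getD_eq_getElem?_getD, h9]
    rw [specStarts]
    simp only [List.nil_append, List.zip_cons_cons, List.zip_nil_left, List.flatMap_cons,
      List.flatMap_nil, List.append_nil]
    rw [PySem.List.pyGetD_natCast, hget, hlen]
    have hcnt : ((i + 1 : Nat) : Int) - (i : Int) = 1 := by push_cast; ring
    rw [hcnt, bEmit_eq_emitRun x 1 (le_refl 1)]
    rw [flatRuns, groups, takeRun]
    simp [groups]
  | succ N ih =>
    intro xs hxs x i L hdrop
    have hi : i < L.length := by
      by_contra hgt
      rw [List.drop_of_length_le (by omega)] at hdrop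
      exact List.cons_ne_nil x xs hdrop.symm
    have hget : L.getD i 0 = x := by
      have h9 : L[i]? = some x := by rw [← List.head?_drop, hdrop]; rfl
      simp [List.getD_eq_getElem?_getD, h9]
    rw [specStarts_eq]
    set k := (takeRun x xs).1 with hk
    have hrest : xs.drop k = (takeRun x xs).2 := takeRun_drop x xs
    match hr : (takeRun x xs).2 with
    | [] =>
      -- the whole remaining suffix is one run of length xs.length + 1
      have hkxs : k = xs.length := by
        have hl := takeRun_len x xs
        rw [hr] at hl
        simp only [List.length_nil] at hl
        omega
      have hlen : L.length = i + 1 + xs.length := by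
        have hld := congrArg List.length hdrop
        simp only [List.length_drop, List.length_cons] at hld
        omega
      dsimp only
      simp only [List.nil_append, List.zip_cons_cons, List.zip_nil_left, List.flatMap_cons,
        List.flatMap_nil, List.append_nil]
      rw [PySem.List.pyGetD_natCast, hget]
      have hcnt : ((L.length : Int)) - (i : Int) = (k : Int) + 1 := by
        rw [hlen, hkxs]; push_cast; ring
      rw [hcnt, bEmit_eq_emitRun x ((k : Int) + 1) (by omega)]
      have hgx : groups (x :: xs) = [(x, (k : Int) + 1)] := by
        rw [groups]
        simp [hr, ← hk, groups]
      simp [flatRuns, hgx]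
    | r :: rs =>
      -- first run of length k + 1, then recurse on r :: rs at index i + k + 1
      have hrs_len : rs.length ≤ N := by
        have hl := takeRun_len x xs
        rw [hr] at hl
        simp only [List.length_cons] at hl
        omega
      have hdrop2 : L.drop (i + k + 1) = r :: rs := by
        have hdd : L.drop (i + (k + 1)) = (L.drop i).drop (k + 1) := by
          rw [List.drop_drop]
        rw [show i + k + 1 = i + (k + 1) by ring, hdd, hdrop]
        simpa [hr] using hrest
      have hidx : (i : Int) + 1 + (k : Int) = ((i + k + 1 : Nat) : Int) := by push_cast; ring
      rw [hidx]
      have htail := ih rs hrs_len r (i + k + 1) L hdrop2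
      dsimp only
      simp only [List.cons_append, List.zip_cons_cons, List.flatMap_cons]
      rw [PySem.List.pyGetD_natCast, hget]
      have hcnt : (((i + k + 1 : Nat) : Int)) - (i : Int) = (k : Int) + 1 := by push_cast; ring
      rw [hcnt, bEmit_eq_emitRun x ((k : Int) + 1) (by omega)]
      rw [htail]
      have hgx : groups (x :: xs) = (x, (k : Int) + 1) :: groups (r :: rs) := by
        rw [groups]
        simp [hr, ← hk]
      simp [flatRuns, hgx]

theorem B_eq_flat (line : List Int) : rle_encode_line_alt line = flatRuns line := by
  match line with
  | [] =>
    simp [rle_encode_line_alt, bStarts, flatRuns, groups, PySem.List.pyRange_one_eq_nil]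
  | x :: xs =>
    simp only [rle_encode_line_alt]
    rw [bStarts_cons, PySem.List.slice_from_one, List.tail_cons]
    have h1 : specStarts x xs 1 = specStarts x xs (((0 : Nat) : Int) + 1) := by norm_num
    rw [show (0 : Int) = ((0 : Nat) : Int) from by norm_num, h1]
    exact zip_core xs.length xs (le_refl _) x 0 (x :: xs) (by simp)

-- ===== VERDICT (by name: the statement is the Claim_ definition above) =====
theorem rle_encode_line_spec : Claim_equal_rle_encode_line := by
  unfold Claim_equal_rle_encode_line Spec_rle_encode_line
  intro line _
  rw [A_eq_flat, B_eq_flat]
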